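-- pv_equiv track=rewrite | github.com/yolanda-tan/croquette | pixelate.py | add_grid
-- ===== SOURCE A (Python) =====
-- SCALE = 25
--
-- def add_grid(enlarged_picture, grid_colour_input):
--     grid_line_colour = ()
--     if grid_colour_input.lower() == 'white':
--         grid_line_colour = (255, 255, 255)
--     if grid_colour_input.lower() == 'black':
--         grid_line_colour = (0, 0, 0)
--     for i, row in enumerate(enlarged_picture):
--         for j, colour in enumerate(row):
--             sector = []
--             if i % SCALE == SCALE - 1:
--                 enlarged_picture[i][j] = grid_line_colour
--             if j % SCALE == SCALE - 1:
--                 enlarged_picture[i][j] = grid_line_colour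
--             if i % SCALE == 0:
--                 enlarged_picture[i][j] = grid_line_colour
--             if j % SCALE == 0:
--                 enlarged_picture[i][j] = grid_line_colour
--     return(enlarged_picture)
-- ===== SOURCE B (Python) =====
-- SCALE = 25
--
-- def add_grid(enlarged_picture, grid_colour_input):
--     grid_line_colour = ()
--     if grid_colour_input.lower() == 'white':
--         grid_line_colour = (255, 255, 255)
--     if grid_colour_input.lower() == 'black':
--         grid_line_colour = (0, 0, 0)
--     for i, row in enumerate(enlarged_picture):
--         if i % SCALE in (0, SCALE - 1):
--             row[:] = [grid_line_colour] * len(row)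
--         else:
--             for j in range(0, len(row), SCALE):
--                 row[j] = grid_line_colour
--             for j in range(SCALE - 1, len(row), SCALE):
--                 row[j] = grid_line_colour
--     return enlarged_picture
-- ===== Notes on version B (the rewrite author's own statement) =====
-- stated objective: alternative
-- what changed: A tests every pixel with four modular conditions inside a nested double loop; B instead overwrites whole grid rows in one slice assignment and touches only the strided grid-column indices (range(0,len,25) and range(24,len,25)) of the remaining rows, so non-grid pixels are never visited.
import Mathlib
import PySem

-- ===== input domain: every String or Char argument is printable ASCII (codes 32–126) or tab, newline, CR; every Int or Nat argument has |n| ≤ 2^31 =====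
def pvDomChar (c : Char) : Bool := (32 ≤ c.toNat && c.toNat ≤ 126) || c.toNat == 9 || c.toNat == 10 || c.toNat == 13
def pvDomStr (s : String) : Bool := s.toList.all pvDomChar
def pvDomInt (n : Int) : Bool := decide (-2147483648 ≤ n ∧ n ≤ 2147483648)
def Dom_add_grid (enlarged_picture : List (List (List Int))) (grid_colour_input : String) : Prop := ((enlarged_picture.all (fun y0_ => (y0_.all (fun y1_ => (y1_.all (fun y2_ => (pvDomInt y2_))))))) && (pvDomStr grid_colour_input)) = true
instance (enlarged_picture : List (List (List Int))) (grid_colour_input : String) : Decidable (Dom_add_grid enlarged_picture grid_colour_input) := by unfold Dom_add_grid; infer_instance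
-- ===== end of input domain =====

-- B overwrites whole grid rows at once and walks only the strided grid columns instead of testing
-- every pixel with four modular conditions; equal return value (both Pythons mutate the argument in place alike).

-- ===== PORT A =====
-- the body of A's inner loop: four independent `if`s, each assigning enlarged_picture[i][j] = grid_line_colour
def addGridBody (g : List Int) (i : Int) (acc2 : List (List (List Int))) (jc : Int × List Int) : List (List (List Int)) :=
  let a1 := if PySem.Int.mod i 25 = 24 then acc2.modify i.toNat (fun r => r.set jc.1.toNat g) else acc2
  let a2 := if PySem.Int.mod jc.1 25 = 24 then a1.modify i.toNat (fun r => r.set jc.1.toNat g) else a1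
  let a3 := if PySem.Int.mod i 25 = 0 then a2.modify i.toNat (fun r => r.set jc.1.toNat g) else a2
  if PySem.Int.mod jc.1 25 = 0 then a3.modify i.toNat (fun r => r.set jc.1.toNat g) else a3

def add_grid (enlarged_picture : List (List (List Int))) (grid_colour_input : String) : List (List (List Int)) :=
  let g0 : List Int := []
  let g1 := if PySem.Str.lower grid_colour_input = "white" then [255, 255, 255] else g0
  let g2 := if PySem.Str.lower grid_colour_input = "black" then [0, 0, 0] else g1
  (PySem.List.enumerate enlarged_picture 0).foldl
    (fun acc ir => (PySem.List.enumerate ir.2 0).foldl (addGridBody g2 ir.1) acc)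
    enlarged_picture

-- ===== PORT B =====
def add_grid_alt (enlarged_picture : List (List (List Int))) (grid_colour_input : String) : List (List (List Int)) :=
  let g0 : List Int := []
  let g1 := if PySem.Str.lower grid_colour_input = "white" then [255, 255, 255] else g0
  let g2 := if PySem.Str.lower grid_colour_input = "black" then [0, 0, 0] else g1
  (PySem.List.enumerate enlarged_picture 0).map (fun ir =>
    if PySem.Int.mod ir.1 25 = 0 ∨ PySem.Int.mod ir.1 25 = 24 then
      PySem.List.pyRepeat [g2] (PySem.List.len ir.2)
    else
      let r1 := (PySem.List.pyRange 0 (PySem.List.len ir.2) 25).foldl (fun r j => r.set j.toNat g2) ir.2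
      (PySem.List.pyRange 24 (PySem.List.len ir.2) 25).foldl (fun r j => r.set j.toNat g2) r1)

-- ===== PRECONDITION & SPEC =====
def Spec_add_grid (enlarged_picture : List (List (List Int))) (grid_colour_input : String) (out : List (List (List Int))) : Prop := out = add_grid_alt enlarged_picture grid_colour_input
instance (enlarged_picture : List (List (List Int))) (grid_colour_input : String) (out : List (List (List Int))) : Decidable (Spec_add_grid enlarged_picture grid_colour_input out) := by unfold Spec_add_grid; infer_instance

-- ===== CLAIM (what is proved, stated in full; the proofs are below) =====
def Claim_equal_add_grid : Prop := ∀ (enlarged_picture : List (List (List Int))) (grid_colour_input : String), Dom_add_grid enlarged_picture grid_colour_input → Spec_add_grid enlarged_picture grid_colour_input (add_grid enlarged_picture grid_colour_input)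

-- ===== LEMMAS AND PROOFS =====

-- pixel (a, b) lies on a grid line
def pvCond (a b : Nat) : Bool := a % 25 == 0 || a % 25 == 24 || b % 25 == 0 || b % 25 == 24

lemma pvModCast (a : Nat) (v : Int) : (PySem.Int.mod (a : Int) 25 = v) ↔ ((a : Int) % 25 = v) := by
  rw [PySem.Int.mod_eq_emod_of_pos (by norm_num)]

-- A's four-if body collapses to one conditional write
lemma pvBodyA_eq (g : List Int) (a b : Nat) (acc : List (List (List Int))) (x : List Int) :
    addGridBody g (a : Int) acc ((b : Int), x) =
      if pvCond a b then acc.modify a (fun r => r.set b g) else acc := by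
  have ha24 : (PySem.Int.mod (a : Int) 25 = 24) ↔ a % 25 = 24 := by rw [pvModCast]; omega
  have hb24 : (PySem.Int.mod (b : Int) 25 = 24) ↔ b % 25 = 24 := by rw [pvModCast]; omega
  have ha0 : (PySem.Int.mod (a : Int) 25 = 0) ↔ a % 25 = 0 := by rw [pvModCast]; omega
  have hb0 : (PySem.Int.mod (b : Int) 25 = 0) ↔ b % 25 = 0 := by rw [pvModCast]; omega
  unfold addGridBody
  dsimp only
  simp only [ha24, hb24, ha0, hb0, Int.toNat_natCast]
  by_cases h1 : a % 25 = 0 <;> by_cases h2 : a % 25 = 24 <;>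
    by_cases h3 : b % 25 = 0 <;> by_cases h4 : b % 25 = 24 <;>
      simp [pvCond, h1, h2, h3, h4,
        List.modify_modify_eq, Function.comp_def, List.set_set]

-- the row transform A's inner loop performs on row index a
def pvRowT (a : Nat) (g : List Int) (row : List (List Int)) (s : Nat) (r : List (List Int)) : List (List Int) :=
  (PySem.List.enumerate row (s : Int)).foldl
    (fun r jc => if pvCond a jc.1.toNat then r.set jc.1.toNat g else r) r

lemma pvInner_modify (g : List Int) (a : Nat) :
    ∀ (row : List (List Int)) (s : Nat) (acc : List (List (List Int))),
      (PySem.List.enumerate row (s : Int)).foldl (addGridBody g (a : Int)) acc =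
        acc.modify a (pvRowT a g row s) := by
  intro row
  induction row with
  | nil =>
    intro s acc
    have h : pvRowT a g [] s = id := funext fun r => by simp [pvRowT, PySem.List.enumerate_nil]
    simp [PySem.List.enumerate_nil, h, List.modify_id]
  | cons x t ih =>
    intro s acc
    have hs : ((s : Int) + 1) = ((s + 1 : Nat) : Int) := by push_cast; ring
    rw [PySem.List.enumerate_cons, List.foldl_cons, hs, ih (s + 1), pvBodyA_eq]
    unfold pvRowT
    rw [PySem.List.enumerate_cons, hs]
    by_cases h : pvCond a s
    · simp [h, List.modify_modify_eq, Function.comp_def]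
    · simp [h]

lemma pvRowT_char (a : Nat) (g : List Int) :
    ∀ (row : List (List Int)) (s : Nat) (r : List (List Int)) (n : Nat),
      (pvRowT a g row s r)[n]? =
        if s ≤ n ∧ n < s + row.length ∧ pvCond a n ∧ n < r.length then some g else r[n]? := by
  intro row
  induction row with
  | nil => intro s r n; unfold pvRowT; simp [PySem.List.enumerate_nil]; omega
  | cons x t ih =>
    intro s r n
    have hs : ((s : Int) + 1) = ((s + 1 : Nat) : Int) := by push_cast; ring
    unfold pvRowT
    rw [PySem.List.enumerate_cons, List.foldl_cons, hs]
    simp only [Int.toNat_natCast]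
    have step := ih (s + 1) (if pvCond a s then r.set s g else r) n
    unfold pvRowT at step
    rw [step]
    by_cases hc : pvCond a s <;> by_cases hpc : pvCond a n <;> by_cases hn : n = s <;>
      simp only [hc, hpc, hn, if_true, List.length_set, List.length_cons,
        List.getElem?_set] <;>
      split_ifs <;> simp_all <;> omega

lemma pvOuter_char (g : List Int) :
    ∀ (rows : List (List (List Int))) (s : Nat) (acc : List (List (List Int))) (m : Nat),
      ((PySem.List.enumerate rows (s : Int)).foldl
          (fun acc ir => (PySem.List.enumerate ir.2 0).foldl (addGridBody g ir.1) acc) acc)[m]? =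
        if h : s ≤ m ∧ m - s < rows.length then (acc[m]?).map (pvRowT m g (rows[m - s]) 0) else acc[m]? := by
  intro rows
  induction rows with
  | nil => intro s acc m; simp [PySem.List.enumerate_nil]
  | cons r t ih =>
    intro s acc m
    have hs : ((s : Int) + 1) = ((s + 1 : Nat) : Int) := by push_cast; ring
    rw [PySem.List.enumerate_cons, List.foldl_cons, hs]
    have hz : (0 : Int) = ((0 : Nat) : Int) := rfl
    have inner : (PySem.List.enumerate r 0).foldl (addGridBody g ((s : Int), r).1) acc =
        acc.modify s (pvRowT s g r 0) := by
      rw [show ((s : Int), r).1 = (s : Int) from rfl, hz, pvInner_modify]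
    rw [inner, ih (s + 1)]
    rw [List.getElem?_modify]
    by_cases hm : m = s
    · have h1 : ¬ (s + 1 ≤ m ∧ m - (s + 1) < t.length) := by omega
      have h2 : s ≤ m ∧ m - s < (r :: t).length := by
        simp only [List.length_cons]
        omega
      rw [dif_neg h1, dif_pos h2]
      have hms0 : m - s = 0 := by omega
      simp only [hms0, List.getElem_cons_zero]
      cases acc[m]? <;> simp [hm]
    · by_cases h3 : s + 1 ≤ m ∧ m - (s + 1) < t.length
      · have h4 : s ≤ m ∧ m - s < (r :: t).length := by
          refine ⟨by omega, ?_⟩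
          simp only [List.length_cons]
          omega
        rw [dif_pos h3, dif_pos h4]
        have hms : m - s = (m - (s + 1)) + 1 := by omega
        simp only [hms, List.getElem_cons_succ]
        cases acc[m]? <;> simp [show ¬ s = m from by omega]
      · have h4 : ¬ (s ≤ m ∧ m - s < (r :: t).length) := by
          simp only [List.length_cons]
          omega
        rw [dif_neg h3, dif_neg h4]
        cases acc[m]? <;> simp [show ¬ s = m from by omega]

lemma pvOuter_char0 (g : List Int) (rows acc : List (List (List Int))) (m : Nat) :
    ((PySem.List.enumerate rows (0 : Int)).foldl
        (fun acc ir => (PySem.List.enumerate ir.2 0).foldl (addGridBody g ir.1) acc) acc)[m]? =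
      if h : m < rows.length then (acc[m]?).map (pvRowT m g (rows[m]) 0) else acc[m]? := by
  have h := pvOuter_char g rows 0 acc m
  simpa using h

lemma pvSetFold_length (g : List Int) :
    ∀ (idxs : List Int) (r : List (List Int)),
      (idxs.foldl (fun r j => r.set j.toNat g) r).length = r.length := by
  intro idxs
  induction idxs with
  | nil => intro r; rfl
  | cons j t ih => intro r; rw [List.foldl_cons, ih]; simp

lemma pvSetFold_char (g : List Int) :
    ∀ (idxs : List Int), (∀ j ∈ idxs, 0 ≤ j) → ∀ (r : List (List Int)) (n : Nat),
      (idxs.foldl (fun r j => r.set j.toNat g) r)[n]? =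
        if (n : Int) ∈ idxs ∧ n < r.length then some g else r[n]? := by
  intro idxs
  induction idxs with
  | nil => intro _ r n; simp
  | cons j t ih =>
    intro hpos r n
    rw [List.foldl_cons, ih (fun x hx => hpos x (List.mem_cons_of_mem _ hx))]
    have hj : 0 ≤ j := hpos j (List.mem_cons_self)
    have hjn : j.toNat = n ↔ (n : Int) = j := by omega
    by_cases he : (n : Int) = j <;>
      simp [List.getElem?_set, he, hjn, List.mem_cons] <;> split_ifs <;> simp_all

-- row-level agreement: A's per-pixel writes on row a equal B's row treatment
lemma pvRow_agree (g : List Int) (m : Nat) (row : List (List Int)) :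
    pvRowT m g row 0 row =
      (if PySem.Int.mod (m : Int) 25 = 0 ∨ PySem.Int.mod (m : Int) 25 = 24 then
        PySem.List.pyRepeat [g] (PySem.List.len row)
      else
        (PySem.List.pyRange 24 (PySem.List.len row) 25).foldl (fun r j => r.set j.toNat g)
          ((PySem.List.pyRange 0 (PySem.List.len row) 25).foldl (fun r j => r.set j.toNat g) row)) := by
  have hm0 : (PySem.Int.mod (m : Int) 25 = 0) ↔ m % 25 = 0 := by rw [pvModCast]; omega
  have hm24 : (PySem.Int.mod (m : Int) 25 = 24) ↔ m % 25 = 24 := by rw [pvModCast]; omega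
  apply List.ext_getElem?
  intro n
  rw [pvRowT_char]
  by_cases hgi : PySem.Int.mod (m : Int) 25 = 0 ∨ PySem.Int.mod (m : Int) 25 = 24
  · have hg : m % 25 = 0 ∨ m % 25 = 24 := by rw [hm0, hm24] at hgi; exact hgi
    have hcmn : pvCond m n := by simp only [pvCond, Bool.or_eq_true, beq_iff_eq]; tauto
    rw [if_pos hgi, PySem.List.pyRepeat_singleton]
    simp only [PySem.List.len_eq, Int.toNat_natCast, List.getElem?_replicate]
    by_cases hn : n < row.length
    · rw [if_pos ⟨by omega, by omega, hcmn, hn⟩, if_pos hn]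
    · rw [if_neg (by omega), if_neg hn, List.getElem?_eq_none (by omega)]
  · have hg : ¬ (m % 25 = 0 ∨ m % 25 = 24) := by rw [hm0, hm24] at hgi; exact hgi
    rw [if_neg hgi]
    have hpos0 : ∀ j ∈ PySem.List.pyRange 0 (PySem.List.len row) 25, (0:Int) ≤ j := by
      intro j hj
      have := (PySem.List.mem_pyRange_iff_of_pos (by norm_num) j).mp hj
      omega
    have hpos24 : ∀ j ∈ PySem.List.pyRange 24 (PySem.List.len row) 25, (0:Int) ≤ j := by
      intro j hj
      have := (PySem.List.mem_pyRange_iff_of_pos (by norm_num) j).mp hj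
      omega
    rw [pvSetFold_char g _ hpos24, pvSetFold_length, pvSetFold_char g _ hpos0]
    have hmem0 : ((n : Int) ∈ PySem.List.pyRange 0 (PySem.List.len row) 25) ↔ (n % 25 = 0 ∧ n < row.length) := by
      rw [PySem.List.mem_pyRange_iff_of_pos (by norm_num), PySem.List.len_eq]
      omega
    have hmem24 : ((n : Int) ∈ PySem.List.pyRange 24 (PySem.List.len row) 25) ↔ (n % 25 = 24 ∧ n < row.length) := by
      rw [PySem.List.mem_pyRange_iff_of_pos (by norm_num), PySem.List.len_eq]
      omega
    simp only [hmem0, hmem24, pvCond, Bool.or_eq_true, beq_iff_eq]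
    split_ifs <;> simp_all

-- ===== VERDICT (by name: the statement is the Claim_ definition above) =====
theorem add_grid_spec : Claim_equal_add_grid := by
  intro pic c _
  unfold Spec_add_grid add_grid add_grid_alt
  dsimp only
  set g : List Int := if PySem.Str.lower c = "black" then [0, 0, 0] else
    if PySem.Str.lower c = "white" then [255, 255, 255] else [] with hgdef
  apply List.ext_getElem?
  intro m
  rw [pvOuter_char0, List.getElem?_map, PySem.List.getElem?_enumerate]
  cases hp : pic[m]? with
  | none => simp
  | some row =>
    obtain ⟨hlt, hrow⟩ := List.getElem?_eq_some_iff.mp hp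
    rw [dif_pos hlt, hrow]
    simp only [Option.map_some, zero_add]
    exact congrArg some (pvRow_agree g m row)
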